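-- pv_equiv track=rewrite | github.com/dexforint/ITMaraphone2025 | utils/stuff/answers3.py | solve
-- ===== SOURCE A (Python) =====
-- def solve(n, spells, m, limits):
--     memo = {}
--
--     def dp(idx, remainings):
--         if idx == n:
--             return 0
--
--         state = (idx, remainings)
--         if state in memo:
--             return memo[state]
--
--         max_power = dp(idx + 1, remainings)
--
--         length, power = spells[idx]
--         for i in range(m):
--             if remainings[i] >= length:
--                 remainings_list = list(remainings)
--                 remainings_list[i] -= length
--                 new_remainings = tuple(remainings_list)
--                 max_power = max(max_power, dp(idx + 1, new_remainings) + power)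
--
--         memo[state] = max_power
--         return max_power
--
--     return dp(0, tuple(limits))
-- ===== SOURCE B (Python) =====
-- def solve(n, spells, m, limits):
--     # Bottom-up forward DP over remaining-capacity states instead of memoized recursion.
--     best = {tuple(limits): 0}
--     for idx in range(n):
--         length, power = spells[idx]
--         new = {}
--         for state, p in best.items():
--             if state not in new or new[state] < p:
--                 new[state] = p
--             for i in range(m):
--                 if state[i] >= length:
--                     ns = state[:i] + (state[i] - length,) + state[i + 1:]
--                     q = p + power
--                     if ns not in new or new[ns] < q:
--                         new[ns] = q
--         best = new
--     return max(best.values())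
-- ===== Notes on version B (the rewrite author's own statement) =====
-- stated objective: alternative
-- what changed: Replaces the top-down memoized recursion over (spell index, remaining-capacity tuple) by a bottom-up forward DP that sweeps the spells once, maintaining a dict from remaining-capacity state to the best power achievable so far (colliding states combined with max) and returning the max of the final dict's values.
import Mathlib
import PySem

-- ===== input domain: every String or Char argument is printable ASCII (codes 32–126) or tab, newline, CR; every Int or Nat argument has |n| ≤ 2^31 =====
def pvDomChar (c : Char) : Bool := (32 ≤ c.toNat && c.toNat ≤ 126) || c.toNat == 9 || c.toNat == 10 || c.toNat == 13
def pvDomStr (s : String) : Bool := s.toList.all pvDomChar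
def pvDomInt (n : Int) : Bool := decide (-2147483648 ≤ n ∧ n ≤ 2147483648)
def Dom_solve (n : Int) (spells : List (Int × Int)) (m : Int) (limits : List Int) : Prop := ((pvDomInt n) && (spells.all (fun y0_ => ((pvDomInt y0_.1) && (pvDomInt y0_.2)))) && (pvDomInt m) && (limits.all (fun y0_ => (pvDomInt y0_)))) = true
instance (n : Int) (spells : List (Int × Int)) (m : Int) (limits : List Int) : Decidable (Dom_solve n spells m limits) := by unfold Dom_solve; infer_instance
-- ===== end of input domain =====

-- B replaces A's memoized top-down recursion by a bottom-up forward DP over a dict of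
-- remaining-capacity states (same cost, no recursion); equivalence on Pre_ is proved below.


-- ===== PORT A =====
-- A's dp(idx, remainings): fuel k counts the indices still to process (idx = n - k); the
-- memo table is a pure cache of a pure function and is dropped in the port.
def dpA (spells : List (Int × Int)) (n m : Int) : Nat → List Int → Int
  | 0, _ => 0
  | (k+1), rem =>
      let lp := (PySem.List.pyGet? spells (n - ((k : Int) + 1))).getD (0, 0)
      (PySem.List.pyRange 0 m 1).foldl
        (fun acc i =>
          if lp.1 ≤ PySem.List.pyGetD rem i 0 then
            max acc (dpA spells n m k
              (PySem.List.pySetD rem i (PySem.List.pyGetD rem i 0 - lp.1)) + lp.2)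
          else acc)
        (dpA spells n m k rem)

def solve (n : Int) (spells : List (Int × Int)) (m : Int) (limits : List Int) : Int :=
  dpA spells n m n.toNat limits

-- ===== PORT B =====
-- new[k] = max(new.get(k, v), v) keeping insertion position (Source B's two-branch update)
def updMax (d : PySem.Dict (List Int) Int) (k : List Int) (v : Int) : PySem.Dict (List Int) Int :=
  match d.get? k with
  | none => d.insert k v
  | some old => if old < v then d.insert k v else d

-- one spell of Source B's outer loop: rebuild the state dict from the current one
def stepB (m : Int) (lp : Int × Int) (best : PySem.Dict (List Int) Int) : PySem.Dict (List Int) Int :=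
  best.items.foldl
    (fun acc p =>
      (PySem.List.pyRange 0 m 1).foldl
        (fun acc2 i =>
          if lp.1 ≤ PySem.List.pyGetD p.1 i 0 then
            updMax acc2 (PySem.List.pySetD p.1 i (PySem.List.pyGetD p.1 i 0 - lp.1)) (p.2 + lp.2)
          else acc2)
        (updMax acc p.1 p.2))
    PySem.Dict.empty

def solve_alt (n : Int) (spells : List (Int × Int)) (m : Int) (limits : List Int) : Int :=
  let best := (PySem.List.pyRange 0 n 1).foldl
    (fun b idx => stepB m ((PySem.List.pyGet? spells idx).getD (0, 0)) b)
    (PySem.Dict.empty.insert limits 0)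
  ((PySem.List.max? best.values (fun v => v)).getD 0)

-- ===== PRECONDITION & SPEC =====
-- exactly the inputs on which the Python A returns: 0 ≤ n ≤ len(spells) (else spells[idx]
-- raises) and, unless n = 0 so the loop body never runs, m ≤ len(limits) (else remainings[i] raises)
def Pre_solve (n : Int) (spells : List (Int × Int)) (m : Int) (limits : List Int) : Prop :=
  0 ≤ n ∧ n ≤ (spells.length : Int) ∧ (m ≤ (limits.length : Int) ∨ n = 0)
instance (n : Int) (spells : List (Int × Int)) (m : Int) (limits : List Int) : Decidable (Pre_solve n spells m limits) := by unfold Pre_solve; infer_instance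

def pvWitness_solve : Int × (List (Int × Int)) × Int × List Int := (2, [(2, 3), (1, 1)], 1, [3])

def Spec_solve (n : Int) (spells : List (Int × Int)) (m : Int) (limits : List Int) (out : Int) : Prop := out = solve_alt n spells m limits
instance (n : Int) (spells : List (Int × Int)) (m : Int) (limits : List Int) (out : Int) : Decidable (Spec_solve n spells m limits out) := by unfold Spec_solve; infer_instance

-- ===== CLAIM (what is proved, stated in full; the proofs are below) =====
def Claim_equal_solve : Prop := ∀ (n : Int) (spells : List (Int × Int)) (m : Int) (limits : List Int), Dom_solve n spells m limits → Pre_solve n spells m limits → Spec_solve n spells m limits (solve n spells m limits)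

-- ===== LEMMAS AND PROOFS =====

-- value of the knapsack recursion on a list of spells (A's orientation: child + power)
def W (m : Int) : List (Int × Int) → List Int → Int
  | [], _ => 0
  | lp :: rest, st =>
      (PySem.List.pyRange 0 m 1).foldl
        (fun acc i =>
          if lp.1 ≤ PySem.List.pyGetD st i 0 then
            max acc (W m rest (PySem.List.pySetD st i (PySem.List.pyGetD st i 0 - lp.1)) + lp.2)
          else acc)
        (W m rest st)

-- the same value, B's orientation (power + child)
def WB (m : Int) : List (Int × Int) → List Int → Int
  | [], _ => 0
  | lp :: rest, st =>
      (PySem.List.pyRange 0 m 1).foldl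
        (fun acc i =>
          if lp.1 ≤ PySem.List.pyGetD st i 0 then
            max acc (lp.2 + WB m rest (PySem.List.pySetD st i (PySem.List.pyGetD st i 0 - lp.1)))
          else acc)
        (WB m rest st)

theorem W_eq_WB (m : Int) : ∀ (ss : List (Int × Int)) (st : List Int), W m ss st = WB m ss st := by
  intro ss
  induction ss with
  | nil => intro st; rfl
  | cons lp rest ih =>
      intro st
      simp only [W, WB, ih]
      congr 1
      funext acc i
      split_ifs with h
      · rw [Int.add_comm]
      · rfl

theorem dpA_eq (spells : List (Int × Int)) (n m : Int) (hn0 : 0 ≤ n)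
    (hnl : n ≤ (spells.length : Int)) :
    ∀ k, k ≤ n.toNat → ∀ rem,
      dpA spells n m k rem = W m ((spells.take n.toNat).drop (n.toNat - k)) rem := by
  have hlen : n.toNat ≤ spells.length := by omega
  intro k
  induction k with
  | zero =>
      intro _ rem
      have hnil : (spells.take n.toNat).drop (n.toNat - 0) = [] := by
        apply List.drop_eq_nil_of_le
        simp [List.length_take]
      rw [hnil]
      rfl
  | succ k ih =>
      intro hk rem
      have hj : n.toNat - (k + 1) < (spells.take n.toNat).length := by
        rw [List.length_take]; omega
      have hj' : n.toNat - (k + 1) < spells.length := by omega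
      have hdrop : (spells.take n.toNat).drop (n.toNat - (k + 1))
          = spells[n.toNat - (k + 1)] :: (spells.take n.toNat).drop (n.toNat - k) := by
        rw [List.drop_eq_getElem_cons hj, List.getElem_take]
        congr 2
        omega
      have hget : PySem.List.pyGet? spells (n - ((k : Int) + 1))
          = some (spells[n.toNat - (k + 1)]) := by
        have hcast : n - ((k : Int) + 1) = ((n.toNat - (k + 1) : Nat) : Int) := by omega
        rw [hcast, PySem.List.pyGet?_natCast, List.getElem?_eq_getElem hj']
      rw [hdrop]
      show (PySem.List.pyRange 0 m 1).foldl _ (dpA spells n m k rem) = _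
      simp only [W, hget, Option.getD_some, ih (by omega)]

-- Option-valued running maximum
def omax (o : Option Int) (v : Int) : Option Int :=
  match o with
  | none => some v
  | some a => some (max a v)

def mxList (l : List Int) (o : Option Int) : Option Int := l.foldl omax o

-- max of pw + f st over a dict's items
def Mx (f : List Int → Int) (l : List (List Int × Int)) : Option Int :=
  mxList (l.map (fun p => p.2 + f p.1)) none

theorem omax_omax (o : Option Int) (v x : Int) :
    omax (omax o v) x = omax (omax o x) v := by
  cases o <;> simp [omax, max_comm, max_left_comm]

theorem mx_omax_comm (l : List Int) : ∀ (o : Option Int) (v : Int),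
    mxList l (omax o v) = omax (mxList l o) v := by
  induction l with
  | nil => intro o v; rfl
  | cons x t ih =>
      intro o v
      show mxList t (omax (omax o v) x) = omax (mxList t (omax o x)) v
      rw [omax_omax, ih]

theorem mx_le_init (l : List Int) : ∀ (o : Option Int) (a : Int), o = some a →
    ∃ b, mxList l o = some b ∧ a ≤ b := by
  induction l with
  | nil => intro o a h; exact ⟨a, h, le_refl a⟩
  | cons x t ih =>
      intro o a h
      subst h
      obtain ⟨b, hb, hab⟩ := ih (omax (some a) x) (max a x) rfl
      exact ⟨b, hb, le_trans (le_max_left a x) hab⟩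

theorem mx_mem_le (l : List Int) : ∀ (o : Option Int) (x : Int), x ∈ l →
    ∃ a, mxList l o = some a ∧ x ≤ a := by
  induction l with
  | nil => intro o x h; cases h
  | cons y t ih =>
      intro o x h
      rcases List.mem_cons.mp h with h | h
      · subst h
        obtain ⟨b, hb, hab⟩ := mx_le_init t (omax o x)
          (a := match o with | none => x | some a => max a x) (by cases o <;> rfl)
        refine ⟨b, hb, le_trans ?_ hab⟩
        cases o <;> simp
      · exact ih (omax o y) x h

theorem omax_absorb (o : Option Int) (y a : Int) (h : o = some a) (hy : y ≤ a) :
    omax o y = o := by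
  subst h; simp [omax, max_eq_left hy]

theorem updMax_nodup (d : PySem.Dict (List Int) Int) (k : List Int) (v : Int)
    (h : d.keys.Nodup) : (updMax d k v).keys.Nodup := by
  unfold updMax
  cases d.get? k with
  | none => exact PySem.Dict.nodup_keys_insert d k v h
  | some old =>
      by_cases hlt : old < v
      · simp only [hlt, if_true]; exact PySem.Dict.nodup_keys_insert d k v h
      · simp only [hlt, if_false]; exact h

theorem mx_append_singleton (L : List Int) (x : Int) (o : Option Int) :
    mxList (L ++ [x]) o = omax (mxList L o) x := by
  simp [mxList, List.foldl_append]

theorem omax_omax_le (o : Option Int) (y z : Int) (h : y ≤ z) :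
    omax (omax o y) z = omax o z := by
  cases o with
  | none => simp [omax, max_eq_right h]
  | some a => simp [omax, max_assoc, max_eq_right h]

theorem Mx_replace (f : List Int → Int) (k : List Int) (old v : Int) (hov : old ≤ v) :
    ∀ (l : List (List Int × Int)) (o : Option Int), (k, old) ∈ l →
      (l.map (fun p => p.1)).Nodup →
      mxList ((l.map (fun p => if p.1 == k then (k, v) else p)).map (fun p => p.2 + f p.1)) o
        = omax (mxList (l.map (fun p => p.2 + f p.1)) o) (v + f k) := by
  intro l
  induction l with
  | nil => intro o hmem; cases hmem
  | cons p rest ih =>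
      intro o hmem hnd
      simp only [List.map_cons, List.nodup_cons] at hnd ⊢
      by_cases hk : p.1 = k
      · have hrest : ∀ q ∈ rest, (if q.1 == k then ((k, v) : List Int × Int) else q) = q := by
          intro q hq
          have : q.1 ≠ k := by
            intro hqk; exact hnd.1 (List.mem_map.mpr ⟨q, hq, hqk.trans hk.symm⟩)
          simp [this]
        have hp : p = (k, old) := by
          rcases List.mem_cons.mp hmem with h | h
          · exact h.symm
          · exact absurd (List.mem_map.mpr ⟨(k, old), h, hk.symm⟩) hnd.1
        subst hp
        simp only [List.map_congr_left hrest, List.map_id_fun', id]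
        simp only [show ((k, old) : List Int × Int).1 == k from by simp, if_true]
        show mxList (List.map (fun p => p.2 + f p.1) rest) (omax o (v + f k))
          = omax (mxList (List.map (fun p => p.2 + f p.1) rest) (omax o (old + f k))) (v + f k)
        rw [mx_omax_comm, mx_omax_comm, omax_omax_le _ _ _ (by omega)]
      · have hmem' : (k, old) ∈ rest := by
          rcases List.mem_cons.mp hmem with h | h
          · exact absurd (congrArg Prod.fst h.symm) hk
          · exact h
        simp only [show (p.1 == k) = false from beq_eq_false_iff_ne.mpr hk,
          Bool.false_eq_true, if_false]
        exact ih (omax o (p.2 + f p.1)) hmem' hnd.2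

theorem Mx_updMax (f : List Int → Int) (d : PySem.Dict (List Int) Int) (k : List Int)
    (v : Int) (h : d.keys.Nodup) :
    Mx f (updMax d k v).items = omax (Mx f d.items) (v + f k) := by
  cases hget : d.get? k with
  | none =>
      have hc : d.contains k = false := by
        rw [PySem.Dict.contains_eq_isSome_get?, hget]; rfl
      rw [show updMax d k v = d.insert k v from by unfold updMax; rw [hget]]
      rw [PySem.Dict.items_insert_of_not_contains d v hc]
      simp only [Mx, List.map_append, List.map_cons, List.map_nil]
      exact mx_append_singleton _ _ _
  | some old =>
      have hc : d.contains k = true := by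
        rw [PySem.Dict.contains_eq_isSome_get?, hget]; rfl
      have hmem : (k, old) ∈ d.items := PySem.Dict.mem_items_of_get?_eq_some d hget
      have hnd' : (d.items.map (fun p => p.1)).Nodup := h
      rw [show updMax d k v = if old < v then d.insert k v else d from by
        unfold updMax; rw [hget]]
      by_cases hlt : old < v
      · simp only [hlt, if_true]
        rw [PySem.Dict.items_insert_of_contains d v hc]
        exact Mx_replace f k old v (le_of_lt hlt) d.items none hmem hnd'
      · simp only [hlt, if_false]
        have hx : (old + f k) ∈ d.items.map (fun p => p.2 + f p.1) :=
          List.mem_map.mpr ⟨(k, old), hmem, rfl⟩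
        obtain ⟨a, ha, hle⟩ := mx_mem_le _ none _ hx
        unfold Mx
        rw [ha, omax_absorb (some a) (v + f k) a rfl (by omega)]

-- the per-spell improvement: best over skipping or assigning one spell, future values by f
def body (m : Int) (lp : Int × Int) (f : List Int → Int) (st : List Int) : Int :=
  (PySem.List.pyRange 0 m 1).foldl
    (fun acc i =>
      if lp.1 ≤ PySem.List.pyGetD st i 0 then
        max acc (lp.2 + f (PySem.List.pySetD st i (PySem.List.pyGetD st i 0 - lp.1)))
      else acc)
    (f st)

theorem omax_omax_max (o : Option Int) (x y : Int) :
    omax (omax o x) y = omax o (max x y) := by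
  cases o <;> simp [omax, max_assoc]

theorem fold_push (lp : Int × Int) (st : List Int) (pw : Int) (f : List Int → Int) :
    ∀ (L : List Int) (O : Option Int) (b : Int),
      L.foldl
        (fun o i =>
          if lp.1 ≤ PySem.List.pyGetD st i 0 then
            omax o (pw + lp.2 + f (PySem.List.pySetD st i (PySem.List.pyGetD st i 0 - lp.1)))
          else o)
        (omax O (pw + b))
        = omax O (pw + L.foldl
            (fun a i =>
              if lp.1 ≤ PySem.List.pyGetD st i 0 then
                max a (lp.2 + f (PySem.List.pySetD st i (PySem.List.pyGetD st i 0 - lp.1)))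
              else a)
            b) := by
  intro L
  induction L with
  | nil => intro O b; rfl
  | cons x t ih =>
      intro O b
      simp only [List.foldl_cons]
      split_ifs with h
      · rw [omax_omax_max, add_assoc pw lp.2, max_add_add_left]
        exact ih O _
      · exact ih O b

theorem inner_spec (f : List Int → Int) (lp : Int × Int) (st : List Int) (pw : Int) :
    ∀ (L : List Int) (acc : PySem.Dict (List Int) Int), acc.keys.Nodup →
      ((L.foldl
          (fun acc2 i =>
            if lp.1 ≤ PySem.List.pyGetD st i 0 then
              updMax acc2 (PySem.List.pySetD st i (PySem.List.pyGetD st i 0 - lp.1)) (pw + lp.2)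
            else acc2)
          acc).keys.Nodup ∧
        Mx f (L.foldl
          (fun acc2 i =>
            if lp.1 ≤ PySem.List.pyGetD st i 0 then
              updMax acc2 (PySem.List.pySetD st i (PySem.List.pyGetD st i 0 - lp.1)) (pw + lp.2)
            else acc2)
          acc).items
          = L.foldl
              (fun o i =>
                if lp.1 ≤ PySem.List.pyGetD st i 0 then
                  omax o (pw + lp.2 + f (PySem.List.pySetD st i (PySem.List.pyGetD st i 0 - lp.1)))
                else o)
              (Mx f acc.items)) := by
  intro L
  induction L with
  | nil => intro acc h; exact ⟨h, rfl⟩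
  | cons x t ih =>
      intro acc h
      simp only [List.foldl_cons]
      split_ifs with hc
      · obtain ⟨h1, h2⟩ := ih (updMax acc (PySem.List.pySetD st x (PySem.List.pyGetD st x 0 - lp.1)) (pw + lp.2)) (updMax_nodup _ _ _ h)
        exact ⟨h1, by rw [h2, Mx_updMax f acc _ _ h]⟩
      · exact ih acc h

theorem step_spec (m : Int) (lp : Int × Int) (f : List Int → Int) :
    ∀ (l : List (List Int × Int)) (acc : PySem.Dict (List Int) Int), acc.keys.Nodup →
      ((l.foldl
          (fun acc p =>
            (PySem.List.pyRange 0 m 1).foldl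
              (fun acc2 i =>
                if lp.1 ≤ PySem.List.pyGetD p.1 i 0 then
                  updMax acc2 (PySem.List.pySetD p.1 i (PySem.List.pyGetD p.1 i 0 - lp.1)) (p.2 + lp.2)
                else acc2)
              (updMax acc p.1 p.2))
          acc).keys.Nodup ∧
        Mx f (l.foldl
          (fun acc p =>
            (PySem.List.pyRange 0 m 1).foldl
              (fun acc2 i =>
                if lp.1 ≤ PySem.List.pyGetD p.1 i 0 then
                  updMax acc2 (PySem.List.pySetD p.1 i (PySem.List.pyGetD p.1 i 0 - lp.1)) (p.2 + lp.2)
                else acc2)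
              (updMax acc p.1 p.2))
          acc).items
          = l.foldl (fun o p => omax o (p.2 + body m lp f p.1)) (Mx f acc.items)) := by
  intro l
  induction l with
  | nil => intro acc h; exact ⟨h, rfl⟩
  | cons p t ih =>
      intro acc h
      simp only [List.foldl_cons]
      have hupd := Mx_updMax f acc p.1 p.2 h
      obtain ⟨h1, h2⟩ := inner_spec f lp p.1 p.2 (PySem.List.pyRange 0 m 1)
        (updMax acc p.1 p.2) (updMax_nodup _ _ _ h)
      obtain ⟨h3, h4⟩ := ih _ h1
      refine ⟨h3, ?_⟩
      rw [h4, h2, hupd, fold_push]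
      simp only [body]

theorem Mx_eq_foldl (g : List Int → Int) (l : List (List Int × Int)) :
    Mx g l = l.foldl (fun o p => omax o (p.2 + g p.1)) none := by
  simp [Mx, mxList, List.foldl_map]

theorem Mx_stepB (m : Int) (lp : Int × Int) (f : List Int → Int)
    (d : PySem.Dict (List Int) Int) :
    (stepB m lp d).keys.Nodup ∧
      Mx f (stepB m lp d).items = Mx (fun st => body m lp f st) d.items := by
  obtain ⟨h1, h2⟩ := step_spec m lp f d.items PySem.Dict.empty PySem.Dict.nodup_keys_empty
  refine ⟨h1, ?_⟩
  unfold stepB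
  rw [h2, Mx_eq_foldl (fun st => body m lp f st) d.items]
  rfl

theorem Mx_congr (f g : List Int → Int) (h : ∀ st, f st = g st) :
    ∀ l, Mx f l = Mx g l := by
  intro l
  unfold Mx
  congr 1
  exact List.map_congr_left (fun p _ => by rw [h])

theorem run_spec (m : Int) : ∀ (ss : List (Int × Int)) (d : PySem.Dict (List Int) Int),
    d.keys.Nodup →
      ((ss.foldl (fun b lp => stepB m lp b) d).keys.Nodup ∧
        Mx (fun _ => (0 : Int)) (ss.foldl (fun b lp => stepB m lp b) d).items
          = Mx (WB m ss) d.items) := by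
  intro ss
  induction ss with
  | nil =>
      intro d h
      exact ⟨h, Mx_congr _ _ (fun st => rfl) d.items⟩
  | cons lp ss ih =>
      intro d h
      simp only [List.foldl_cons]
      obtain ⟨h1, h2⟩ := Mx_stepB m lp (WB m ss) d
      obtain ⟨h3, h4⟩ := ih (stepB m lp d) h1
      exact ⟨h3, by rw [h4, h2]; exact Mx_congr _ _ (fun st => rfl) d.items⟩

theorem foldl_omax_some : ∀ (t : List Int) (x : Int),
    t.foldl omax (some x) = some (t.foldl max x) := by
  intro t
  induction t with
  | nil => intro x; rfl
  | cons y t ih => intro x; exact ih (max x y)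

theorem max?_eq_mxList (l : List Int) : PySem.List.max? l (fun v => v) = mxList l none := by
  cases l with
  | nil => rfl
  | cons x t =>
      rw [PySem.List.max?_id_cons]
      show some (t.foldl max x) = t.foldl omax (some x)
      rw [foldl_omax_some]

theorem Mx_zero (l : List (List Int × Int)) :
    Mx (fun _ => (0 : Int)) l = mxList (l.map (fun p => p.2)) none := by
  unfold Mx
  congr 1
  simp

-- B's index loop over pyRange 0 n 1 folds exactly the first n spells
theorem foldl_range_get {α : Type} (g : α → (Int × Int) → α) (spells : List (Int × Int)) :
    ∀ (k : Nat), k ≤ spells.length → ∀ (init : α),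
      (PySem.List.pyRange 0 (k : Int) 1).foldl
          (fun b idx => g b ((PySem.List.pyGet? spells idx).getD (0, 0))) init
        = (spells.take k).foldl g init := by
  intro k
  induction k with
  | zero => intro _ init; rfl
  | succ k ih =>
      intro hk init
      have hk' : k ≤ spells.length := by omega
      have hkl : k < spells.length := by omega
      rw [show ((k + 1 : Nat) : Int) = (k : Int) + 1 from by push_cast; ring,
        PySem.List.pyRange_one_succ_right (a := 0) (b := (k : Int)) (by omega),
        List.foldl_append, ih hk']
      have hget : PySem.List.pyGet? spells (k : Int) = some spells[k] := by
        rw [PySem.List.pyGet?_natCast, List.getElem?_eq_getElem hkl]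
      rw [show List.take (k+1) spells = List.take k spells ++ [spells[k]] from by
        rw [List.take_add_one, List.getElem?_eq_getElem hkl]; rfl]
      rw [List.foldl_append]
      simp [hget]

theorem solve_alt_eq (n : Int) (spells : List (Int × Int)) (m : Int) (limits : List Int)
    (hn0 : 0 ≤ n) (hnl : n ≤ (spells.length : Int)) :
    solve_alt n spells m limits = WB m (spells.take n.toNat) limits := by
  unfold solve_alt
  have hcast : n = (n.toNat : Int) := by omega
  rw [hcast, foldl_range_get (fun b lp => stepB m lp b) spells n.toNat (by omega)]
  have hbest0 : ((PySem.Dict.empty : PySem.Dict (List Int) Int).insert limits 0).items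
      = [(limits, 0)] := by
    rw [PySem.Dict.items_insert_of_not_contains PySem.Dict.empty 0
      (PySem.Dict.contains_empty limits)]
    rfl
  have hnd0 : ((PySem.Dict.empty : PySem.Dict (List Int) Int).insert limits 0).keys.Nodup :=
    PySem.Dict.nodup_keys_insert _ _ _ PySem.Dict.nodup_keys_empty
  obtain ⟨hnd, hmx⟩ := run_spec m (spells.take n.toNat) (PySem.Dict.empty.insert limits 0) hnd0
  show (PySem.List.max? ((spells.take n.toNat).foldl (fun b lp => stepB m lp b)
    (PySem.Dict.empty.insert limits 0)).values (fun v => v)).getD 0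
    = WB m (spells.take n.toNat) limits
  rw [show ((spells.take n.toNat).foldl (fun b lp => stepB m lp b)
      (PySem.Dict.empty.insert limits 0)).values
    = ((spells.take n.toNat).foldl (fun b lp => stepB m lp b)
      (PySem.Dict.empty.insert limits 0)).items.map (fun p => p.2) from rfl]
  rw [max?_eq_mxList, ← Mx_zero, hmx, hbest0]
  show (some ((0 : Int) + WB m (spells.take n.toNat) limits)).getD 0 = _
  rw [zero_add]
  rfl

-- ===== VERDICT (by name: the statement is the Claim_ definition above) =====
theorem solve_spec : Claim_equal_solve := by
  intro n spells m limits _ hpre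
  obtain ⟨hn0, hnl, _⟩ := hpre
  show solve n spells m limits = solve_alt n spells m limits
  rw [solve_alt_eq n spells m limits hn0 hnl, ← W_eq_WB]
  unfold solve
  rw [dpA_eq spells n m hn0 hnl n.toNat (le_refl _) limits, Nat.sub_self, List.drop_zero]
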